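-- pv_equiv track=rewrite | github.com/SergeJohanns/BRIAN | TextToBrainoof.py | FindBaseInteger
-- ===== SOURCE A (Python) =====
-- def FindBaseInteger(intListIn):
--     A = [[x for x in range(0, max(intListIn) - i, i + 1)] for i in range(max(intListIn))] #Get a two-dimensional list [[1,2..k],[2,4..k]..[k]]
--     B = []
--     i = 0 #Counter for n
--     for n in intListIn:
--         B.append([]) #Add a two-dimenstional list of the form of A
--         j = 0 #Counter for col
--         for col in A:
--             B[i].append([]) #Add a column to that list
--             k = 1 #Counter for elem
--             for elem in col:
--                 B[i][j].append(k+abs(n-elem))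
--                 k += 1
--             j += 1
--         i += 1
--     B = [[min(col) for col in matrix] for matrix in B] #Select the most efficient coefficient for each letter for each basis integer
--     B = [sum([B[j][i] for j in range(len(B))]) for i in range(len(B[0]))] #Sum the costs of every letter assuming the most efficient coefficient for each basis integer
--     B = [B[i] + sum(GetDivisors(i + 1)) + 5 * len(GetDivisors(i + 1)) for i in range(len(B))] #Correct the weights for the length of the integer counter construct
--     return B.index(min(B)) + 1 #Return the most efficient basis integer
--
-- def GetDivisors(n): #Gets the complete list of prime factors, including duplicates
--     divs = SubDivisors(n)
--     low = [x for x in divs if x <= 3] #Used to reduce all n < 4 to products to save loop overhead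
--     high = [x for x in divs if x > 3]
--     return Reduce(low) + high
--
-- def SubDivisors(n): #Recursive helper function for the GetDivisors function
--     if n < 2:
--         return []
--     for i in range(2, n + 1):
--         if n % i == 0:
--             return [i] + SubDivisors(n // i)
--
-- def Reduce(intList): #Reduces a list of 2s and 3s to minimal (as low as possible) products
--     #Assumes the list is sorted, which it is
--     out = []
--     for i in range(0, len(intList) - 1, 2):
--         out.append(intList[i] * intList[i+1])
--     if len(intList) % 2 != 0:
--         out.append(intList[len(intList) - 1])
--     return out
-- ===== SOURCE B (Python) =====
-- def FindBaseInteger(intListIn):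
--     K = max(intListIn)
--     # Per base b, the per-letter cost min_m (m+1+|n-m*b|) over m in [0, K//b - 1] is
--     # convex in m, so it is attained at floor(n/b) clamped into range (or its neighbour).
--     totals = []
--     for b in range(1, K + 1):
--         M = K // b - 1
--         total = 0
--         for n in intListIn:
--             q = n // b
--             if q < 0:
--                 q = 0
--             c1 = q if q < M else M
--             c2 = q + 1 if q + 1 < M else M
--             f1 = c1 + 1 + abs(n - c1 * b)
--             f2 = c2 + 1 + abs(n - c2 * b)
--             total += f1 if f1 < f2 else f2
--         divs = GetDivisors(b)
--         totals.append(total + sum(divs) + 5 * len(divs))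
--     return totals.index(min(totals)) + 1
--
-- def GetDivisors(n): #Gets the complete list of prime factors, including duplicates
--     divs = SubDivisors(n)
--     low = [x for x in divs if x <= 3] #Used to reduce all n < 4 to products to save loop overhead
--     high = [x for x in divs if x > 3]
--     return Reduce(low) + high
--
-- def SubDivisors(n): #Recursive helper function for the GetDivisors function
--     if n < 2:
--         return []
--     for i in range(2, n + 1):
--         if n % i == 0:
--             return [i] + SubDivisors(n // i)
--
-- def Reduce(intList): #Reduces a list of 2s and 3s to minimal (as low as possible) products
--     out = []
--     for i in range(0, len(intList) - 1, 2):
--         out.append(intList[i] * intList[i+1])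
--     if len(intList) % 2 != 0:
--         out.append(intList[len(intList) - 1])
--     return out
-- ===== Notes on version B (the rewrite author's own statement) =====
-- stated objective: faster
-- what changed: A materializes, per letter and basis integer, the whole column of candidate costs (all multiples of the base) and takes its minimum; B exploits that the per-column cost m+1+|n-m*b| is convex in m and evaluates it only at floor(n/b) clamped into range (and its neighbour), an O(1) closed-form column minimum per (letter, base), accumulating one total per base in a single pass.
import Mathlib
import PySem

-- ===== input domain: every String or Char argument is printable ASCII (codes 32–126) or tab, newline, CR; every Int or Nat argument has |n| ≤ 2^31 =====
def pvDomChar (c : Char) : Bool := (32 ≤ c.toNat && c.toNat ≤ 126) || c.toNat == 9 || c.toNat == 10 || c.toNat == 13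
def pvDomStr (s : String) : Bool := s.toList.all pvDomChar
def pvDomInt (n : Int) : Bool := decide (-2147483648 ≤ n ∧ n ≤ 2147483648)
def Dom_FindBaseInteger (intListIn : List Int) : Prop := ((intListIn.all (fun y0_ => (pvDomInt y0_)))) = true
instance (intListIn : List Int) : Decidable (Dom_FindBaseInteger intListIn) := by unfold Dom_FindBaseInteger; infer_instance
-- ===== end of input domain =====

-- B replaces A's per-base column scan (min over all multiples) by a closed-form O(1) convex
-- minimum per (letter, base); measured faster. Divisor helpers are shared by both programs.

-- ===== shared helpers (GetDivisors/SubDivisors/Reduce are identical in Source A and Source B) =====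

-- first i in [i, n) with n % i == 0, else n (the Python loop 'for i in range(2, n+1)'
-- always succeeds at i = n at the latest, and n % n == 0, so returning n there is exact)
def pvFirstDiv (n i : Nat) : Nat :=
  if i < n then (if n % i = 0 then i else pvFirstDiv n (i + 1)) else n
termination_by n - i

theorem pvFirstDiv_ge (n i : Nat) (h : i ≤ n) : i ≤ pvFirstDiv n i := by
  unfold pvFirstDiv
  split
  · split
    · omega
    · have := pvFirstDiv_ge n (i + 1) (by omega)
      omega
  · omega
termination_by n - i

-- SubDivisors, on Nat (Python's is called with nonnegative ints only from GetDivisors via toNat;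
-- n < 2, including what negative ints map to, returns [])
def pvSubDiv (n : Nat) : List Int :=
  if n < 2 then [] else
    let d := pvFirstDiv n 2
    (d : Int) :: pvSubDiv (n / d)
termination_by n
decreasing_by
  have h2 : 2 ≤ pvFirstDiv n 2 := pvFirstDiv_ge n 2 (by omega)
  exact Nat.div_lt_self (by omega) (by omega)

def ReducePy (l : List Int) : List Int :=
  let out := (PySem.List.pyRange 0 (PySem.List.len l - 1) 2).foldl
      (fun out i => out ++ [PySem.List.pyGetD l i 0 * PySem.List.pyGetD l (i + 1) 0]) []
  if PySem.Int.mod (PySem.List.len l) 2 ≠ 0 then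
    out ++ [PySem.List.pyGetD l (PySem.List.len l - 1) 0]
  else out

def GetDivisorsPy (n : Int) : List Int :=
  let divs := pvSubDiv n.toNat
  let low := divs.filter (fun x => decide (x ≤ 3))
  let high := divs.filter (fun x => decide (3 < x))
  ReducePy low ++ high

-- ===== PORT A =====
def FindBaseInteger (intListIn : List Int) : Int :=
  let K := (PySem.List.max? intListIn (fun x => x)).getD 0
  let Amat := (PySem.List.pyRange 0 K 1).map (fun i => PySem.List.pyRange 0 (K - i) (i + 1))
  -- the i/j/k counters only index the appends; appending built rows is the faithful rendering
  let B1 := intListIn.foldl (fun (acc : List (List (List Int))) n =>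
      acc ++ [Amat.foldl (fun (rows : List (List Int)) col =>
        rows ++ [(col.foldl (fun (p : List Int × Int) elem =>
            (p.1 ++ [p.2 + |n - elem|], p.2 + 1)) (([] : List Int), 1)).1]) []]) []
  let B2 := B1.map (fun matrix => matrix.map (fun col => (PySem.List.min? col (fun x => x)).getD 0))
  let B3 := (PySem.List.pyRange 0 (PySem.List.len (PySem.List.pyGetD B2 0 [])) 1).map (fun i =>
      ((PySem.List.pyRange 0 (PySem.List.len B2) 1).map (fun j =>
        PySem.List.pyGetD (PySem.List.pyGetD B2 j []) i 0)).sum)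
  let B4 := (PySem.List.pyRange 0 (PySem.List.len B3) 1).map (fun i =>
      PySem.List.pyGetD B3 i 0 + (GetDivisorsPy (i + 1)).sum
        + 5 * PySem.List.len (GetDivisorsPy (i + 1)))
  (((PySem.List.index? B4 ((PySem.List.min? B4 (fun x => x)).getD 0)).getD 0 : Nat) : Int) + 1

-- ===== PORT B =====
def FindBaseInteger_alt (intListIn : List Int) : Int :=
  let K := (PySem.List.max? intListIn (fun x => x)).getD 0
  let totals := (PySem.List.pyRange 1 (K + 1) 1).foldl (fun (ts : List Int) b =>
      let M := PySem.Int.floordiv K b - 1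
      let total := intListIn.foldl (fun t n =>
          let q0 := PySem.Int.floordiv n b
          let q := if q0 < 0 then 0 else q0
          let c1 := if q < M then q else M
          let c2 := if q + 1 < M then q + 1 else M
          let f1 := c1 + 1 + |n - c1 * b|
          let f2 := c2 + 1 + |n - c2 * b|
          t + (if f1 < f2 then f1 else f2)) 0
      let divs := GetDivisorsPy b
      ts ++ [total + divs.sum + 5 * PySem.List.len divs]) []
  (((PySem.List.index? totals ((PySem.List.min? totals (fun x => x)).getD 0)).getD 0 : Nat) : Int) + 1

-- ===== PRECONDITION & SPEC =====
-- Pre_ excludes exactly the inputs where the Python A raises: the empty list (max of empty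
-- raises ValueError) and lists whose maximum is < 1 (min of an empty column list raises).
-- Source B raises on exactly the same inputs.
def Pre_FindBaseInteger (intListIn : List Int) : Prop :=
  intListIn ≠ [] ∧ ∃ x ∈ intListIn, 1 ≤ x
instance (intListIn : List Int) : Decidable (Pre_FindBaseInteger intListIn) := by
  unfold Pre_FindBaseInteger; infer_instance

def pvWitness_FindBaseInteger : List Int := [3, 1]

def Spec_FindBaseInteger (intListIn : List Int) (out : Int) : Prop := out = FindBaseInteger_alt intListIn
instance (intListIn : List Int) (out : Int) : Decidable (Spec_FindBaseInteger intListIn out) := by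
  unfold Spec_FindBaseInteger; infer_instance

-- ===== CLAIM (what is proved, stated in full; the proofs are below) =====
def Claim_equal_FindBaseInteger : Prop := ∀ (intListIn : List Int), Dom_FindBaseInteger intListIn → Pre_FindBaseInteger intListIn → Spec_FindBaseInteger intListIn (FindBaseInteger intListIn)

-- ===== LEMMAS AND PROOFS =====

def pvClosed (n b M : Int) : Int :=
  min (min (max (PySem.Int.floordiv n b) 0) M + 1 + |n - min (max (PySem.Int.floordiv n b) 0) M * b|)
      (min (max (PySem.Int.floordiv n b) 0 + 1) M + 1 + |n - min (max (PySem.Int.floordiv n b) 0 + 1) M * b|)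

theorem pvFoldRow (n : Int) (e : Nat → Int) (m : Nat) :
    ((List.range m).map e).foldl (fun (p : List Int × Int) elem =>
        (p.1 ++ [p.2 + |n - elem|], p.2 + 1)) (([] : List Int), 1)
      = ((List.range m).map (fun (j : Nat) => (1 + (j : Int)) + |n - e j|), 1 + (m : Int)) := by
  induction m with
  | zero => simp
  | succ m ih =>
    rw [List.range_succ, List.map_append, List.foldl_append, ih, List.map_append]
    simp
    ring

theorem pvKeyIneq (n b M mI : Int) (hb : 0 < b) (hM : 0 ≤ M) (h0 : 0 ≤ mI) (h1 : mI ≤ M) :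
    pvClosed n b M ≤ mI + 1 + |n - mI * b| := by
  unfold pvClosed
  set q0 := PySem.Int.floordiv n b with hq0def
  set c1 := min (max q0 0) M with hc1def
  set c2 := min (max q0 0 + 1) M with hc2def
  by_cases hm : mI ≤ q0
  · have hmb : mI * b ≤ n := (PySem.Int.le_floordiv_iff_mul_le hb).mp hm
    have hq0 : 0 ≤ q0 := le_trans h0 hm
    have hc1q : c1 ≤ q0 := le_trans (min_le_left _ _) (by omega)
    have hc1b : c1 * b ≤ n := (PySem.Int.le_floordiv_iff_mul_le hb).mp hc1q
    have hmc1 : mI ≤ c1 := le_min (by omega) h1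
    have key := mul_le_mul_of_nonneg_right hmc1 (by omega : (0:Int) ≤ b - 1)
    have h1' : |n - c1 * b| = n - c1 * b := abs_of_nonneg (by omega)
    have h2' : |n - mI * b| = n - mI * b := abs_of_nonneg (by omega)
    have : c1 + 1 + |n - c1 * b| ≤ mI + 1 + |n - mI * b| := by
      rw [h1', h2']; nlinarith
    exact le_trans (min_le_left _ _) this
  · have hq0m : q0 < mI := by omega
    have hmb : n < mI * b := (PySem.Int.floordiv_lt_iff_lt_mul hb).mp hq0m
    by_cases hm0 : mI = 0
    · subst hm0
      have hc1 : c1 = 0 := by omega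
      have : c1 + 1 + |n - c1 * b| ≤ 0 + 1 + |n - 0 * b| := by rw [hc1]
      exact le_trans (min_le_left _ _) this
    · have hm1 : 1 ≤ mI := by omega
      have hc2m : c2 ≤ mI := le_trans (min_le_left _ _) (by omega)
      have hc2lb : q0 + 1 ≤ c2 := le_min (by omega) (by omega)
      have hc2b : n < c2 * b := (PySem.Int.floordiv_lt_iff_lt_mul hb).mp (by omega)
      have key := mul_le_mul_of_nonneg_right hc2m (by omega : (0:Int) ≤ b + 1)
      have h1' : |n - c2 * b| = -(n - c2 * b) := abs_of_nonpos (by omega)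
      have h2' : |n - mI * b| = -(n - mI * b) := abs_of_nonpos (by omega)
      have : c2 + 1 + |n - c2 * b| ≤ mI + 1 + |n - mI * b| := by
        rw [h1', h2']; nlinarith
      exact le_trans (min_le_right _ _) this

theorem pvMinRow (n b : Int) (m : Nat) (hb : 0 < b) (hm : 0 < m) :
    (PySem.List.min? ((List.range m).map (fun (j : Nat) => (1 + (j : Int)) + |n - (j : Int) * b|))
        (fun x => x)).getD 0
      = pvClosed n b ((m : Int) - 1) := by
  set L := (List.range m).map (fun (j : Nat) => (1 + (j : Int)) + |n - (j : Int) * b|) with hL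
  have hne : L ≠ [] := by
    simp [hL]; omega
  obtain ⟨v, hv⟩ : ∃ v, PySem.List.min? L (fun x => x) = some v := by
    cases h : PySem.List.min? L (fun x => x) with
    | none => exact absurd ((PySem.List.min?_eq_none_iff L _).mp h) hne
    | some v => exact ⟨v, rfl⟩
  have hvm := PySem.List.min?_mem hv
  have hmin := PySem.List.min?_isMin hv
  rw [hv, Option.getD_some]
  -- candidate membership
  have hmem : ∀ c : Int, 0 ≤ c → c ≤ (m : Int) - 1 → c + 1 + |n - c * b| ∈ L := by
    intro c h0 h1
    rw [hL, List.mem_map]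
    refine ⟨c.toNat, List.mem_range.mpr (by omega), ?_⟩
    have hc : (c.toNat : Int) = c := Int.toNat_of_nonneg h0
    rw [hc]; ring
  have hMd : (0:Int) ≤ (m : Int) - 1 := by omega
  have hc1b : 0 ≤ min (max (PySem.Int.floordiv n b) 0) ((m:Int) - 1) ∧
      min (max (PySem.Int.floordiv n b) 0) ((m:Int) - 1) ≤ (m:Int) - 1 := by omega
  have hc2b : 0 ≤ min (max (PySem.Int.floordiv n b) 0 + 1) ((m:Int) - 1) ∧
      min (max (PySem.Int.floordiv n b) 0 + 1) ((m:Int) - 1) ≤ (m:Int) - 1 := by omega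
  apply le_antisymm
  · unfold pvClosed
    exact le_min (hmin _ (hmem _ hc1b.1 hc1b.2)) (hmin _ (hmem _ hc2b.1 hc2b.2))
  · obtain ⟨j, hj, hje⟩ := List.mem_map.mp (hL ▸ hvm)
    rw [← hje]
    have := pvKeyIneq n b ((m:Int) - 1) (j : Int) hb hMd (by omega)
      (by have := List.mem_range.mp hj; omega)
    calc pvClosed n b ((m:Int)-1) ≤ (j:Int) + 1 + |n - (j:Int) * b| := this
      _ = (1 + (j:Int)) + |n - (j:Int) * b| := by ring

theorem pvColEq (K i : Int) (h0 : 0 ≤ i) (hi : i < K) :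
    PySem.List.pyRange 0 (K - i) (i + 1)
      = (List.range ((PySem.Int.floordiv K (i + 1)).toNat)).map (fun (j : Nat) => (j : Int) * (i + 1)) := by
  have hb : (0:Int) < i + 1 := by omega
  rw [PySem.List.pyRange_of_pos 0 (K - i) hb]
  have h1 : K - i - 0 + (i + 1) - 1 = K := by ring
  have h2 : (0:Int) < K - i := by omega
  rw [h1, if_pos h2, PySem.Int.floordiv_eq_ediv_of_pos (a := K) hb]
  exact List.map_congr_left (fun k _ => by ring)

theorem pvFloordivPos (K i : Int) (h0 : 0 ≤ i) (hi : i < K) :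
    1 ≤ PySem.Int.floordiv K (i + 1) := by
  rw [PySem.Int.le_floordiv_iff_mul_le (by omega)]; omega


def pvFinal (L : List Int) : Int :=
  (((PySem.List.index? L ((PySem.List.min? L (fun x => x)).getD 0)).getD 0 : Nat) : Int) + 1

def pvA2 (l : List Int) (K : Int) : List Int :=
  let Amat := (PySem.List.pyRange 0 K 1).map (fun i => PySem.List.pyRange 0 (K - i) (i + 1))
  let B1 := l.foldl (fun (acc : List (List (List Int))) n =>
      acc ++ [Amat.foldl (fun (rows : List (List Int)) col =>
        rows ++ [(col.foldl (fun (p : List Int × Int) elem =>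
            (p.1 ++ [p.2 + |n - elem|], p.2 + 1)) (([] : List Int), 1)).1]) []]) []
  let B2 := B1.map (fun matrix => matrix.map (fun col => (PySem.List.min? col (fun x => x)).getD 0))
  let B3 := (PySem.List.pyRange 0 (PySem.List.len (PySem.List.pyGetD B2 0 [])) 1).map (fun i =>
      ((PySem.List.pyRange 0 (PySem.List.len B2) 1).map (fun j =>
        PySem.List.pyGetD (PySem.List.pyGetD B2 j []) i 0)).sum)
  (PySem.List.pyRange 0 (PySem.List.len B3) 1).map (fun i =>
      PySem.List.pyGetD B3 i 0 + (GetDivisorsPy (i + 1)).sum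
        + 5 * PySem.List.len (GetDivisorsPy (i + 1)))

def pvB2 (l : List Int) (K : Int) : List Int :=
  (PySem.List.pyRange 1 (K + 1) 1).foldl (fun (ts : List Int) b =>
      let M := PySem.Int.floordiv K b - 1
      let total := l.foldl (fun t n =>
          let q0 := PySem.Int.floordiv n b
          let q := if q0 < 0 then 0 else q0
          let c1 := if q < M then q else M
          let c2 := if q + 1 < M then q + 1 else M
          let f1 := c1 + 1 + |n - c1 * b|
          let f2 := c2 + 1 + |n - c2 * b|
          t + (if f1 < f2 then f1 else f2)) 0
      let divs := GetDivisorsPy b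
      ts ++ [total + divs.sum + 5 * PySem.List.len divs]) []

theorem pvA_unfold (l : List Int) (mx : Int)
    (hmx : PySem.List.max? l (fun x => x) = some mx) :
    FindBaseInteger l = pvFinal (pvA2 l mx) := by
  unfold FindBaseInteger pvFinal pvA2
  rw [hmx]
  rfl

theorem pvB_unfold (l : List Int) (mx : Int)
    (hmx : PySem.List.max? l (fun x => x) = some mx) :
    FindBaseInteger_alt l = pvFinal (pvB2 l mx) := by
  unfold FindBaseInteger_alt pvFinal pvB2
  rw [hmx]
  rfl

def pvBase (l : List Int) (K b : Int) : Int :=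
  (l.map (fun n => pvClosed n b (PySem.Int.floordiv K b - 1))).sum
    + (GetDivisorsPy b).sum + 5 * PySem.List.len (GetDivisorsPy b)

def pvCanon (l : List Int) (K : Int) : List Int :=
  (PySem.List.pyRange 0 K 1).map (fun i => pvBase l K (i + 1))

theorem pvIfLt (a b : Int) : (if a < b then a else b) = min a b := by
  rw [min_def]; split_ifs <;> omega

theorem pvIfNeg (a : Int) : (if a < 0 then 0 else a) = max a 0 := by
  rw [max_def]; split_ifs <;> omega

theorem pvB2_eq (l : List Int) (K : Int) :
    pvB2 l K = pvCanon l K := by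
  unfold pvB2 pvCanon pvBase
  simp only [PySem.List.foldl_append_singleton_eq_map, List.nil_append,
    PySem.List.pyRange_one, add_sub_cancel_right, sub_zero, List.map_map,
    PySem.List.foldl_add, zero_add, pvIfLt, pvIfNeg]
  refine List.map_congr_left (fun k hk => ?_)
  simp only [Function.comp_apply]
  rw [show (1:Int) + (k:Int) = (k:Int) + 1 from by ring]
  unfold pvClosed
  rfl

theorem pvLen0 {α β : Type} (l : List α) (f : α → List β) (hne : l ≠ []) (m : Int)
    (hlen : ∀ a, PySem.List.len (f a) = m) :
    PySem.List.len (PySem.List.pyGetD (List.map f l) 0 []) = m := by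
  cases l with
  | nil => exact absurd rfl hne
  | cons a t => rw [List.map_cons, PySem.List.pyGetD_zero_cons, hlen]

theorem pvMapGet {α β γ : Type} (l : List α) (f : α → β) (d : β) (g : β → γ) :
    (PySem.List.pyRange 0 (l.length : Int) 1).map
        (fun j => g (PySem.List.pyGetD (List.map f l) j d))
      = l.map (fun a => g (f a)) := by
  have h1 : (PySem.List.pyRange 0 ((l.length : Int)) 1).map
      (fun j => PySem.List.pyGetD (List.map f l) j d) = List.map f l := by
    have := PySem.List.map_pyGetD_pyRange_zero (List.map f l) d
    simpa [PySem.List.len_eq] using this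
  calc (PySem.List.pyRange 0 (l.length : Int) 1).map
        (fun j => g (PySem.List.pyGetD (List.map f l) j d))
      = ((PySem.List.pyRange 0 (l.length : Int) 1).map
          (fun j => PySem.List.pyGetD (List.map f l) j d)).map g := by
        rw [List.map_map]; rfl
    _ = (List.map f l).map g := by rw [h1]
    _ = l.map (fun a => g (f a)) := by rw [List.map_map]; rfl

theorem pvA2_eq (l : List Int) (K : Int) (hK : 1 ≤ K) (hne : l ≠ []) :
    pvA2 l K = pvCanon l K := by
  unfold pvA2 pvCanon
  simp only [PySem.List.foldl_append_singleton_eq_map, List.nil_append, List.map_map]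
  rw [pvLen0 l _ hne K (by
    intro a
    simp only [PySem.List.len_eq, Function.comp_apply, List.length_map,
      PySem.List.length_pyRange_one]
    omega)]
  simp only [PySem.List.len_eq, List.length_map, PySem.List.length_pyRange_one, sub_zero]
  rw [Int.toNat_of_nonneg (by omega : (0:Int) ≤ K)]
  refine List.map_congr_left (fun i hi => ?_)
  obtain ⟨hi0, hiK⟩ := (PySem.List.mem_pyRange_one).mp hi
  rw [PySem.List.pyGetD_map_pyRange_of_nonneg _ K i 0 hi0 hiK]
  rw [pvMapGet (g := fun row => PySem.List.pyGetD row i 0)]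
  unfold pvBase
  simp only [PySem.List.len_eq, Function.comp_apply]
  congr 1
  congr 1
  refine congrArg List.sum (List.map_congr_left (fun n _ => ?_))
  rw [List.map_map, PySem.List.pyGetD_map_pyRange_of_nonneg _ K i 0 hi0 hiK]
  simp only [Function.comp_apply]
  rw [pvColEq K i hi0 hiK, pvFoldRow]
  have hfd : 1 ≤ PySem.Int.floordiv K (i + 1) := pvFloordivPos K i hi0 hiK
  have hm : ((PySem.Int.floordiv K (i + 1)).toNat : Int) = PySem.Int.floordiv K (i + 1) :=
    Int.toNat_of_nonneg (by omega)
  rw [pvMinRow n (i + 1) _ (by omega) (by omega)]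
  rw [hm]

theorem pv_main (l : List Int) (h : Pre_FindBaseInteger l) :
    FindBaseInteger l = FindBaseInteger_alt l := by
  obtain ⟨hne, x, hxmem, hx1⟩ := h
  obtain ⟨mx, hmx⟩ : ∃ mx, PySem.List.max? l (fun x => x) = some mx := by
    cases hm : PySem.List.max? l (fun x => x) with
    | none => exact absurd ((PySem.List.max?_eq_none_iff l _).mp hm) hne
    | some v => exact ⟨v, rfl⟩
  have hK : 1 ≤ mx := le_trans hx1 (PySem.List.max?_isMax hmx x hxmem)
  rw [pvA_unfold l mx hmx, pvB_unfold l mx hmx, pvA2_eq l mx hK hne, pvB2_eq l mx]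

-- ===== VERDICT (by name: the statement is the Claim_ definition above) =====
theorem FindBaseInteger_spec : Claim_equal_FindBaseInteger := by
  intro l _ hpre
  exact pv_main l hpre
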